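-- pv_equiv track=rewrite | github.com/jtduby/codeeval | self_describing/self_desc.py | gen_digit_dict
-- ===== SOURCE A (Python) =====
-- def gen_digit_dict(n):
--     """Creates a dictionary where the keys k range from 0 to the number of
--     digits in n and point to the frequency at which k appears in the positive
--     integer n.
--
--     If a digit outside of the above range is encountered, None is returned to
--     the caller instead of the dictionary.
--     """
--     digit_dict = gen_n_dict(n)
--     for d in [int(c) for c in str(n)]:
--         try:
--             digit_dict[d] += 1
--         except:
--             return None
--     return digit_dict
--
-- def gen_n_dict(n):
--     """Creates a doctionary where the keys range from 0 to the number of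
--     digits in n. The definition for each key is 0.
--     """
--     n_dict = {}
--     for i in range(0, len(str(n))):
--         n_dict[i] = 0
--     return n_dict
-- ===== SOURCE B (Python) =====
-- def gen_digit_dict(n):
--     # Two-phase: compute the digit list once, validate it against the length,
--     # then project counts for each key with list.count (A counts incrementally
--     # with try/except on a pre-zeroed dict).
--     digits = [int(c) for c in str(n)]
--     L = len(digits)
--     if max(digits) >= L:
--         return None
--     return {k: digits.count(k) for k in range(L)}
-- ===== Notes on version B (the rewrite author's own statement) =====
-- stated objective: alternative
-- what changed: A's single incremental loop (pre-zeroed dict, try/except increment, early return None) is replaced by a count-then-validate-then-project shape: build the digit list, reject via max(digits) >= L, otherwise build the result dict directly from digits.count(k).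
import Mathlib
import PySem

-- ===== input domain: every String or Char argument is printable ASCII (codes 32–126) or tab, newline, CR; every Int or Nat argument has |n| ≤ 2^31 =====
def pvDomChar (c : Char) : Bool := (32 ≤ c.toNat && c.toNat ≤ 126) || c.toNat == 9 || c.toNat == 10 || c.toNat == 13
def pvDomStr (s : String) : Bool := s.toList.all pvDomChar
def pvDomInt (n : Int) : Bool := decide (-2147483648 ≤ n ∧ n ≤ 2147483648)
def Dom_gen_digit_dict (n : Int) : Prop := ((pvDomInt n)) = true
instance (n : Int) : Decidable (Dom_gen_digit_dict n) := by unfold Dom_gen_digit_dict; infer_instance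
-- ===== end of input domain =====

-- B replaces A's incremental try/except counting loop by a count-then-validate-then-project
-- shape (digit list, max-based validity check, counts projected with list.count); objective: alternative.


-- ===== PORT A =====
-- [int(c) for c in str(n)] — the comprehension both A and B open with, transliterated once.
-- For the admitted inputs (0 ≤ n) every character of str(n) is a decimal digit, so int(c)
-- never raises and the `.getD 0` default is unreachable there.
def pvDigits (n : Int) : List Int :=
  (PySem.Int.toChars n).map (fun c => (PySem.Int.ofChars? [c]).getD 0)

-- gen_n_dict: {i: 0 for i in range(0, len(str(n)))} built by the loop
def pvGenNDict (n : Int) : PySem.Dict Int Int :=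
  (PySem.List.pyRange 0 ((PySem.Int.toChars n).length : Int) 1).foldl
    (fun d i => d.insert i 0) PySem.Dict.empty

-- the for-loop with try: digit_dict[d] += 1 / except: return None
def pvLoopA : List Int → PySem.Dict Int Int → Option (PySem.Dict Int Int)
  | [], d => some d
  | x :: xs, d =>
    match d.get? x with
    | some v => pvLoopA xs (d.insert x (v + 1))
    | none => none

def gen_digit_dict (n : Int) : Option (List (Int × Int)) :=
  (pvLoopA (pvDigits n) (pvGenNDict n)).map PySem.Dict.items

-- ===== PORT B =====
def gen_digit_dict_alt (n : Int) : Option (List (Int × Int)) :=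
  let digits := pvDigits n
  let L : Int := PySem.List.len digits
  match PySem.List.max? digits id with
  | none => none   -- max([]) raises in Python; unreachable: str(n) is never empty
  | some m =>
    if L ≤ m then none
    else some ((PySem.List.pyRange 0 L 1).map (fun k => (k, (digits.count k : Int))))

-- ===== PRECONDITION & SPEC =====
-- Pre_ excludes exactly n < 0, where str(n) starts with '-' and int('-') raises ValueError in A (and in B).
def Pre_gen_digit_dict (n : Int) : Prop := 0 ≤ n
instance (n : Int) : Decidable (Pre_gen_digit_dict n) := by unfold Pre_gen_digit_dict; infer_instance
def pvWitness_gen_digit_dict : Int := 10213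

def Spec_gen_digit_dict (n : Int) (out : Option (List (Int × Int))) : Prop := out = gen_digit_dict_alt n
instance (n : Int) (out : Option (List (Int × Int))) : Decidable (Spec_gen_digit_dict n out) := by unfold Spec_gen_digit_dict; infer_instance

-- ===== CLAIM (what is proved, stated in full; the proofs are below) =====
def Claim_equal_gen_digit_dict : Prop := ∀ (n : Int), Dom_gen_digit_dict n → Pre_gen_digit_dict n → Spec_gen_digit_dict n (gen_digit_dict n)

-- ===== LEMMAS AND PROOFS =====

-- every character produced by Nat.toDigits 10 is the digitChar of a value < 10
lemma pv_toDigitsCore_mem (f : Nat) : ∀ (m : Nat) (acc : List Char) (c : Char),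
    c ∈ Nat.toDigitsCore 10 f m acc → (∃ d, d < 10 ∧ c = Nat.digitChar d) ∨ c ∈ acc := by
  induction f with
  | zero => intro m acc c hc; exact Or.inr hc
  | succ f ih =>
    intro m acc c hc
    simp only [Nat.toDigitsCore] at hc
    by_cases h : m / 10 = 0
    · simp only [h] at hc
      rcases List.mem_cons.mp hc with h1 | h1
      · exact Or.inl ⟨m % 10, Nat.mod_lt _ (by omega), h1⟩
      · exact Or.inr h1
    · simp only [if_neg h] at hc
      rcases ih _ _ _ hc with h1 | h1
      · exact Or.inl h1
      · rcases List.mem_cons.mp h1 with h2 | h2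
        · exact Or.inl ⟨m % 10, Nat.mod_lt _ (by omega), h2⟩
        · exact Or.inr h2

lemma pv_toDigitsCore_le_length (f : Nat) : ∀ (m : Nat) (acc : List Char),
    acc.length ≤ (Nat.toDigitsCore 10 f m acc).length := by
  induction f with
  | zero => intro m acc; simp [Nat.toDigitsCore]
  | succ f ih =>
    intro m acc
    simp only [Nat.toDigitsCore]
    by_cases h : m / 10 = 0
    · simp [h]
    · rw [if_neg h]
      calc acc.length ≤ (Nat.digitChar (m % 10) :: acc).length := by simp
        _ ≤ _ := ih _ _

lemma pv_toDigitsCore_ne_nil (f : Nat) (m : Nat) (acc : List Char) (h : 0 < f) :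
    Nat.toDigitsCore 10 f m acc ≠ [] := by
  cases f with
  | zero => omega
  | succ f =>
    simp only [Nat.toDigitsCore]
    by_cases hm : m / 10 = 0
    · simp [hm]
    · rw [if_neg hm]
      intro hnil
      have := pv_toDigitsCore_le_length f (m / 10) (Nat.digitChar (m % 10) :: acc)
      rw [hnil] at this
      simp at this

lemma pvDigits_ne_nil (n : Int) : pvDigits n ≠ [] := by
  unfold pvDigits PySem.Int.toChars
  split
  · simp
  · simp only [ne_eq, List.map_eq_nil_iff]
    exact pv_toDigitsCore_ne_nil _ _ _ (Nat.succ_pos _)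

lemma pvDigits_nonneg (n : Int) (hn : 0 ≤ n) : ∀ x ∈ pvDigits n, 0 ≤ x := by
  intro x hx
  unfold pvDigits PySem.Int.toChars at hx
  rw [if_neg (by omega)] at hx
  rcases List.mem_map.mp hx with ⟨c, hc, rfl⟩
  rcases pv_toDigitsCore_mem _ _ _ _ hc with ⟨d, hd, rfl⟩ | h
  · interval_cases d <;> decide
  · simp at h

-- characterisation of A's try/except loop: it succeeds iff every digit is a key,
-- and then it is the modify-fold (the counting loop) on the same dict
lemma pvLoopA_eq (ds : List Int) (d : PySem.Dict Int Int) :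
    pvLoopA ds d = if ∀ x ∈ ds, d.contains x = true
      then some (ds.foldl (fun d x => d.modify x 0 (· + 1)) d) else none := by
  induction ds generalizing d with
  | nil => simp [pvLoopA]
  | cons x xs ih =>
    simp only [pvLoopA]
    cases hx : d.get? x with
    | none =>
      have hc : d.contains x = false := by
        rw [PySem.Dict.contains_eq_isSome_get?, hx]; rfl
      rw [if_neg]
      intro h
      have := h x (List.mem_cons_self ..)
      rw [hc] at this; exact Bool.false_ne_true this
    | some v =>
      have hc : d.contains x = true := by
        rw [PySem.Dict.contains_eq_isSome_get?, hx]; rfl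
      have hmod : d.modify x 0 (· + 1) = d.insert x (v + 1) := by
        show d.insert x (d.getD x 0 + 1) = d.insert x (v + 1)
        rw [PySem.Dict.getD_of_get?_eq_some d 0 hx]
      show pvLoopA xs (d.insert x (v + 1)) = _
      rw [ih]
      by_cases hall : ∀ y ∈ xs, d.contains y = true
      · rw [if_pos, if_pos]
        · simp [List.foldl_cons, hmod]
        · intro y hy
          rcases List.mem_cons.mp hy with rfl | hy'
          · exact hc
          · exact hall y hy'
        · intro y hy
          rw [PySem.Dict.contains_insert]
          simp [hall y hy]
      · rw [if_neg, if_neg]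
        · intro h
          exact hall fun y hy => h y (List.mem_cons_of_mem _ hy)
        · intro h
          apply hall
          intro y hy
          have := h y hy
          rw [PySem.Dict.contains_insert] at this
          rcases Bool.or_eq_true_iff.mp this with h1 | h1
          · rw [eq_of_beq h1]; exact hc
          · exact h1

-- gen_n_dict's items: the fresh-key insert loop appends (i, 0) for each i in range
lemma pvGenNDict_items (n : Int) :
    (pvGenNDict n).items
      = (PySem.List.pyRange 0 ((PySem.Int.toChars n).length : Int) 1).map (fun i => (i, (0 : Int))) := by
  unfold pvGenNDict
  have := PySem.Dict.items_foldl_insert_fresh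
    (PySem.List.pyRange 0 ((PySem.Int.toChars n).length : Int) 1)
    (fun i => i) (fun _ => (0 : Int)) PySem.Dict.empty
    (fun a _ => PySem.Dict.contains_empty a)
    (by simpa using PySem.List.nodup_pyRange_one 0 ((PySem.Int.toChars n).length : Int))
  simpa using this

lemma pvGenNDict_keys (n : Int) :
    (pvGenNDict n).keys = PySem.List.pyRange 0 ((PySem.Int.toChars n).length : Int) 1 := by
  show (pvGenNDict n).items.map (·.1) = _
  rw [pvGenNDict_items, List.map_map]
  exact List.map_id _

lemma pvGenNDict_contains (n : Int) (x : Int) :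
    (pvGenNDict n).contains x = true ↔ (0 ≤ x ∧ x < ((PySem.Int.toChars n).length : Int)) := by
  rw [PySem.Dict.contains_iff_mem_keys, pvGenNDict_keys, PySem.List.mem_pyRange_one]

lemma pvGenNDict_getD (n : Int) (k : Int)
    (hk : 0 ≤ k ∧ k < ((PySem.Int.toChars n).length : Int)) :
    (pvGenNDict n).getD k 0 = 0 := by
  apply PySem.Dict.getD_of_mem_items
  · rw [pvGenNDict_items]
    exact List.mem_map.mpr ⟨k, PySem.List.mem_pyRange_one.mpr hk, rfl⟩
  · rw [pvGenNDict_keys]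
    exact PySem.List.nodup_pyRange_one _ _

-- the counting fold over gen_n_dict has the projected items B builds directly
lemma pv_fold_items (n : Int) (ds : List Int)
    (hall : ∀ x ∈ ds, (pvGenNDict n).contains x = true) :
    (ds.foldl (fun d x => d.modify x 0 (· + 1)) (pvGenNDict n)).items
      = (PySem.List.pyRange 0 ((PySem.Int.toChars n).length : Int) 1).map
          (fun k => (k, (ds.count k : Int))) := by
  set d0 := pvGenNDict n with hd0
  set D := ds.foldl (fun d x => d.modify x 0 (· + 1)) d0 with hD
  have hkeys : D.keys = d0.keys := by
    rw [hD]
    have := PySem.Dict.keys_foldl_modify ds (0 : Int) (fun _ _ => (· + 1)) d0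
    rw [this, PySem.Set.update_eq_append_filter]
    have hfil : ((PySem.Set.ofList ds).filter (fun y => !PySem.Set.contains d0.keys y)) = [] := by
      apply List.filter_eq_nil_iff.mpr
      intro y hy
      have hy' : y ∈ ds := (PySem.Set.mem_ofList ds y).mp hy
      have hmem : y ∈ d0.keys := (PySem.Dict.contains_iff_mem_keys d0 y).mp (hall y hy')
      simp
      exact hmem
    rw [hfil, List.append_nil]
  have hnd : D.keys.Nodup := by
    rw [hkeys, pvGenNDict_keys]; exact PySem.List.nodup_pyRange_one _ _
  rw [PySem.Dict.items_eq_map_keys D hnd 0, hkeys, pvGenNDict_keys]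
  apply List.map_congr_left
  intro k hk
  have hgd : D.getD k 0 = d0.getD k 0 + (ds.count k : Int) := by
    rw [hD]
    exact PySem.Dict.getD_foldl_modify_add_one ds d0 k
  rw [hgd, hd0, pvGenNDict_getD n k (PySem.List.mem_pyRange_one.mp hk), zero_add]

-- the validity conditions coincide: all digits in range ↔ max digit < L (digits nonneg, nonempty)
-- length bookkeeping: pvDigits is a map over toChars
lemma pvDigits_length (n : Int) : (pvDigits n).length = (PySem.Int.toChars n).length := by
  unfold pvDigits; simp

lemma pv_cond (n : Int) (hn : 0 ≤ n) (m : Int)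
    (hm : PySem.List.max? (pvDigits n) id = some m) :
    (∀ x ∈ pvDigits n, (pvGenNDict n).contains x = true)
      ↔ ¬ (((pvDigits n).length : Int) ≤ m) := by
  have hmem : m ∈ pvDigits n := PySem.List.max?_mem hm
  have hmax : ∀ y ∈ pvDigits n, y ≤ m := by
    intro y hy; exact PySem.List.max?_isMax hm y hy
  constructor
  · intro hall hle
    have := (pvGenNDict_contains n m).mp (hall m hmem)
    rw [← pvDigits_length n] at this
    omega
  · intro hlt x hx
    rw [pvGenNDict_contains, ← pvDigits_length n]
    exact ⟨pvDigits_nonneg n hn x hx, by have := hmax x hx; omega⟩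

-- ===== VERDICT (by name: the statement is the Claim_ definition above) =====
theorem gen_digit_dict_spec : Claim_equal_gen_digit_dict := by
  intro n _ hn
  unfold Spec_gen_digit_dict gen_digit_dict gen_digit_dict_alt
  rw [pvLoopA_eq]
  cases hm : PySem.List.max? (pvDigits n) id with
  | none =>
    exact absurd ((PySem.List.max?_eq_none_iff _ _).mp hm) (pvDigits_ne_nil n)
  | some m =>
    simp only [hm, PySem.List.len_eq]
    by_cases hle : ((pvDigits n).length : Int) ≤ m
    · rw [if_neg, if_pos hle]
      · rfl
      · rw [pv_cond n hn m hm]; omega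
    · rw [if_pos ((pv_cond n hn m hm).mpr hle), if_neg hle]
      simp only [Option.map_some]
      rw [pv_fold_items n (pvDigits n) ((pv_cond n hn m hm).mpr hle)]
      rw [pvDigits_length n]
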